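-- pv_equiv track=rewrite | github.com/electrolyteJ/algorithms | src/training/dp_memoization/剑指 Offer 46. 把数字翻译成字符串.py | translateNum2
-- ===== SOURCE A (Python) =====
-- def translateNum2(num: int) -> int:#dp空间优化
--     nums = [c for c in str(num)]
--     n = len(nums)
--     o, p, q = 0, 1, 1
--     for i in range(2, n+1):
--         nums_i = i-1
--         o, p = p, q
--         if nums[nums_i-1]+nums[nums_i] > '25' or nums[nums_i-1] == '0':
--             q = p
--         else:
--             q = p+o
--     return q
-- ===== SOURCE B (Python) =====
-- def translateNum2(num: int) -> int:
--     s = str(num)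
--     n = len(s)
--     memo = {n: 1}
--
--     def f(i):
--         if i in memo:
--             return memo[i]
--         ways = f(i + 1)
--         if i + 1 < n and s[i] != '0' and s[i:i + 2] <= '25':
--             ways += f(i + 2)
--         memo[i] = ways
--         return ways
--
--     return f(0)
-- ===== Notes on version B (the rewrite author's own statement) =====
-- stated objective: alternative
-- what changed: Replaces the forward three-variable rolling DP over range(2, n+1) with a top-down memoized recursion f(i) counting translations of the suffix s[i:], keeping A's exact string-comparison pair condition.
import Mathlib
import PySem

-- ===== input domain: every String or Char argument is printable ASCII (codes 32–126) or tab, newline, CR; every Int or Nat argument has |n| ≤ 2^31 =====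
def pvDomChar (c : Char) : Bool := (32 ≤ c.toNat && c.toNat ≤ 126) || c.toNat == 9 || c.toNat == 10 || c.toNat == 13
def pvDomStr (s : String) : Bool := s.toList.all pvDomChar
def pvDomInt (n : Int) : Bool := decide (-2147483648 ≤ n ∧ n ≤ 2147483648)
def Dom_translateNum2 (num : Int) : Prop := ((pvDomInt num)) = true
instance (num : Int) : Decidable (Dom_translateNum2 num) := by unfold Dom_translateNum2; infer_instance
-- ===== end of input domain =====

-- B re-implements A's forward rolling DP as a memoized suffix recursion (same values, different decomposition).

-- Python '<' on strings, by code points (exact: lexicographic comparison)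
def pvStrLt : List Char → List Char → Bool
  | [], [] => false
  | [], _ :: _ => true
  | _ :: _, [] => false
  | x :: xs, y :: ys =>
      decide (x.toNat < y.toNat) || (x.toNat == y.toNat && pvStrLt xs ys)

-- Python '<=' on strings, by code points (exact: lexicographic comparison)
def pvStrLe : List Char → List Char → Bool
  | [], _ => true
  | _ :: _, [] => false
  | x :: xs, y :: ys =>
      decide (x.toNat < y.toNat) || (x.toNat == y.toNat && pvStrLe xs ys)

-- ===== PORT A =====
-- loop body of A's 'for i in range(2, n+1)'; indices numsI-1 and numsI are always
-- in range (2 ≤ i ≤ n), so pyGetD's default is never used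
def aStep (nums : List Char) (st : Int × Int × Int) (i : Int) : Int × Int × Int :=
  let numsI := i - 1
  let o := st.2.1   -- o, p = p, q
  let p := st.2.2
  if pvStrLt ['2', '5'] [PySem.List.pyGetD nums (numsI - 1) ' ', PySem.List.pyGetD nums numsI ' ']
      || PySem.List.pyGetD nums (numsI - 1) ' ' == '0' then
    (o, p, p)
  else
    (o, p, p + o)

def translateNum2 (num : Int) : Int :=
  let nums := PySem.Int.toChars num
  let n : Int := nums.length
  let st := (PySem.List.pyRange 2 (n + 1) 1).foldl (aStep nums) (0, 1, 1)
  st.2.2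

-- ===== PORT B =====
-- f(i) of Source B, as structural recursion on the suffix s[i:] (the memo is pure caching)
def altGo : List Char → Int
  | [] => 1
  | [_] => 1
  | c :: d :: rest =>
      altGo (d :: rest) +
        (if !(c == '0') && pvStrLe [c, d] ['2', '5'] then altGo rest else 0)

def translateNum2_alt (num : Int) : Int :=
  altGo (PySem.Int.toChars num)

-- ===== PRECONDITION & SPEC =====
def Spec_translateNum2 (num : Int) (out : Int) : Prop := out = translateNum2_alt num
instance (num : Int) (out : Int) : Decidable (Spec_translateNum2 num out) := by unfold Spec_translateNum2; infer_instance

-- ===== CLAIM (what is proved, stated in full; the proofs are below) =====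
def Claim_equal_translateNum2 : Prop := ∀ (num : Int), Dom_translateNum2 num → Spec_translateNum2 num (translateNum2 num)

-- ===== LEMMAS AND PROOFS =====

-- A's branch test is the negation of B's pair condition
theorem cond_iff (c d : Char) :
    (pvStrLt ['2', '5'] [c, d] || c == '0')
      = !(!(c == '0') && pvStrLe [c, d] ['2', '5']) := by
  rw [Bool.eq_iff_iff]
  by_cases hb : (c == '0') = true <;> simp [pvStrLt, pvStrLe, hb] <;> omega

theorem altGo_take_one (s : List Char) : altGo (s.take 1) = 1 := by
  cases s <;> simp [altGo]

-- appending a pair to the string: how altGo grows at the right end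
theorem altGo_append : ∀ (n : Nat) (s : List Char), s.length ≤ n → ∀ c d : Char,
    altGo (s ++ [c, d])
      = altGo (s ++ [c]) + (if !(c == '0') && pvStrLe [c, d] ['2', '5'] then altGo s else 0) := by
  intro n
  induction n with
  | zero =>
    intro s hs c d
    have : s = [] := List.length_eq_zero_iff.mp (Nat.le_zero.mp hs)
    subst this
    simp [altGo]
  | succ n ih =>
    intro s hs c d
    match s with
    | [] => simp [altGo]
    | [e] =>
      simp only [List.cons_append, List.nil_append, altGo]
      split_ifs <;> ring
    | e :: f :: s' =>
      have h1 : (f :: s').length ≤ n := by simpa using Nat.succ_le_succ_iff.mp hs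
      have h2 : s'.length ≤ n := by simp at h1 ⊢; omega
      have ih1 := ih (f :: s') h1 c d
      have ih2 := ih s' h2 c d
      simp only [List.cons_append, altGo] at ih1 ih2 ⊢
      rw [ih1, ih2]
      split_ifs <;> ring

theorem take_succ_of_lt (s : List Char) (k : Nat) (h : k < s.length) :
    s.take (k + 1) = s.take k ++ [s[k]] := by
  rw [List.take_add_one, List.getElem?_eq_getElem h]
  rfl

-- loop invariant: after processing i = 2 .. m+2 (i.e. range(2, (m+1)+1)),
-- p and q hold the translation counts of the prefixes of length m and m+1
theorem loop_inv (s : List Char) : ∀ (m : Nat), m + 1 ≤ s.length →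
    ∃ o, (PySem.List.pyRange 2 ((m : Int) + 1 + 1) 1).foldl (aStep s) (0, 1, 1)
        = (o, altGo (s.take m), altGo (s.take (m + 1))) := by
  intro m
  induction m with
  | zero =>
    intro _
    refine ⟨0, ?_⟩
    rw [PySem.List.pyRange_one_eq_nil (by norm_num)]
    simp [altGo, altGo_take_one]
  | succ m ih =>
    intro h
    obtain ⟨o, ho⟩ := ih (by omega)
    refine ⟨altGo (s.take m), ?_⟩
    have hsplit : PySem.List.pyRange 2 (((m + 1 : Nat) : Int) + 1 + 1) 1
        = PySem.List.pyRange 2 ((m : Int) + 1 + 1) 1 ++ [(m : Int) + 2] := by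
      have := PySem.List.pyRange_one_succ_right (a := 2) (b := (m : Int) + 2) (by omega)
      push_cast
      convert this using 2
    rw [hsplit, List.foldl_append, ho]
    have hm : m < s.length := by omega
    have hm1 : m + 1 < s.length := by omega
    have hc1 : PySem.List.pyGetD s ((m : Int) + 2 - 1 - 1) ' ' = s[m] := by
      have : (m : Int) + 2 - 1 - 1 = ((m : Nat) : Int) := by ring
      rw [this, PySem.List.pyGetD_natCast, List.getD_eq_getElem _ _ hm]
    have hc2 : PySem.List.pyGetD s ((m : Int) + 2 - 1) ' ' = s[m + 1] := by
      have : (m : Int) + 2 - 1 = (((m + 1 : Nat)) : Int) := by push_cast; ring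
      rw [this, PySem.List.pyGetD_natCast, List.getD_eq_getElem _ _ hm1]
    have htake2 : s.take (m + 1 + 1) = s.take m ++ [s[m], s[m + 1]] := by
      rw [take_succ_of_lt s (m + 1) hm1, take_succ_of_lt s m hm, List.append_assoc]
      rfl
    have htake1 : s.take (m + 1) = s.take m ++ [s[m]] := take_succ_of_lt s m hm
    rw [htake2, altGo_append (s.take m).length (s.take m) le_rfl s[m] s[m + 1], ← htake1]
    simp only [List.foldl_cons, List.foldl_nil, aStep, hc1, hc2, cond_iff]
    by_cases hcond : (!(s[m] == '0') && pvStrLe [s[m], s[m + 1]] ['2', '5']) = true <;>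
      simp [hcond]

theorem key (s : List Char) :
    ((PySem.List.pyRange 2 ((s.length : Int) + 1) 1).foldl (aStep s) (0, 1, 1)).2.2
      = altGo s := by
  match hs : s with
  | [] =>
    rw [PySem.List.pyRange_one_eq_nil (by simp)]
    simp [altGo]
  | c :: t =>
    obtain ⟨o, ho⟩ := loop_inv (c :: t) t.length (by simp)
    have hlen : ((c :: t).length : Int) + 1 = ((t.length : Nat) : Int) + 1 + 1 := by
      push_cast [List.length_cons]; ring
    rw [hlen, ho]
    simp

-- ===== VERDICT (by name: the statement is the Claim_ definition above) =====
theorem translateNum2_spec : Claim_equal_translateNum2 := by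
  intro num _
  show translateNum2 num = translateNum2_alt num
  unfold translateNum2 translateNum2_alt
  exact key (PySem.Int.toChars num)
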